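-- pv_equiv track=rewrite | github.com/AmeerEleyan/Encryption-Project | test.py | create_bands
-- ===== SOURCE A (Python) =====
-- def create_bands(shingles, num_bands):
--     bands = []
--     for s in shingles:
--         b = []
--         for i in range(num_bands):
--             band = frozenset(list(s)[i * num_bands:(i + 1) * num_bands])
--             b.append(band)
--         bands.append(b)
--     return bands
-- ===== SOURCE B (Python) =====
-- def create_bands(shingles, num_bands):
--     bands = []
--     for s in shingles:
--         lst = list(s)
--         b = []
--         k = num_bands
--         while k > 0:
--             b.append(frozenset(lst[:num_bands]))
--             lst = lst[num_bands:]
--             k -= 1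
--         bands.append(b)
--     return bands
-- ===== Notes on version B (the rewrite author's own statement) =====
-- stated objective: alternative
-- what changed: Replaces A's indexed banding (for each i in range(num_bands), re-materialise list(s) and slice out s[i*num_bands:(i+1)*num_bands]) by a peeling loop that repeatedly takes the first num_bands elements as the next band and drops them from the remaining list, so no band indices are computed and list(s) is materialised once.
import Mathlib
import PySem

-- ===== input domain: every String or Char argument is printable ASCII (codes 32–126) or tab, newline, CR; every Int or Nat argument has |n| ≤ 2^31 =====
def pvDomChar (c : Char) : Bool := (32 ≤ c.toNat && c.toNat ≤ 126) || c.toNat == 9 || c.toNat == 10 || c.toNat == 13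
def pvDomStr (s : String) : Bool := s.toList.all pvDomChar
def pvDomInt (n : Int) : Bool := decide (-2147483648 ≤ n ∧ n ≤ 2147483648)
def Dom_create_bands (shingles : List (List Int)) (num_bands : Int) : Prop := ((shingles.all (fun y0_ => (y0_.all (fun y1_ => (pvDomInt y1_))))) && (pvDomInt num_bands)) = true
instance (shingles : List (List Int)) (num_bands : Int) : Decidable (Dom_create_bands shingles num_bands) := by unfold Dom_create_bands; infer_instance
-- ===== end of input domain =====

-- B replaces A's per-band indexed slicing with a loop that peels the first num_bands
-- elements off the remaining list num_bands times (alternative decomposition).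


-- ===== PORT A =====
def create_bands (shingles : List (List Int)) (num_bands : Int) : List (List (List Int)) :=
  shingles.foldl (fun bands s =>
    bands ++ [(PySem.List.pyRange 0 num_bands 1).foldl (fun b i =>
      b ++ [PySem.Set.ofList (PySem.List.slice s (some (i * num_bands)) (some ((i + 1) * num_bands)))]) []]) []

-- ===== PORT B =====
-- the while loop: peel the first num_bands elements off lst as one band, k times, appending to b
def pvBandsOf (n : Int) (b : List (List Int)) (lst : List Int) (k : Int) : List (List Int) :=
  if h : k ≤ 0 then b
  else
    pvBandsOf n (b ++ [PySem.Set.ofList (PySem.List.slice lst none (some n))])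
      (PySem.List.slice lst (some n) none) (k - 1)
termination_by k.toNat
decreasing_by omega

def create_bands_alt (shingles : List (List Int)) (num_bands : Int) : List (List (List Int)) :=
  shingles.foldl (fun bands s => bands ++ [pvBandsOf num_bands [] s num_bands]) []

-- ===== PRECONDITION & SPEC =====
def Spec_create_bands (shingles : List (List Int)) (num_bands : Int) (out : List (List (List Int))) : Prop := out = create_bands_alt shingles num_bands
instance (shingles : List (List Int)) (num_bands : Int) (out : List (List (List Int))) : Decidable (Spec_create_bands shingles num_bands out) := by unfold Spec_create_bands; infer_instance

-- ===== CLAIM (what is proved, stated in full; the proofs are below) =====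
def Claim_equal_create_bands : Prop := ∀ (shingles : List (List Int)) (num_bands : Int), Dom_create_bands shingles num_bands → Spec_create_bands shingles num_bands (create_bands shingles num_bands)

-- ===== LEMMAS AND PROOFS =====

-- B's recursion, characterised: with band width m > 0 and fuel k, pvBandsOf yields the k chunks of lst
theorem pvBandsOf_eq_chunks (m : Nat) :
    ∀ (k : Nat) (b : List (List Int)) (lst : List Int),
      pvBandsOf (m : Int) b lst (k : Int) =
        b ++ (List.range k).map (fun i => PySem.Set.ofList ((lst.drop (i * m)).take m)) := by
  intro k
  induction k with
  | zero => intro b lst; rw [pvBandsOf]; simp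
  | succ k ih =>
    intro b lst
    rw [pvBandsOf]
    have hk : ¬ ((k + 1 : Nat) : Int) ≤ 0 := by exact_mod_cast by omega
    rw [dif_neg hk]
    have h1 : ((k + 1 : Nat) : Int) - 1 = (k : Int) := by push_cast; ring
    rw [h1, PySem.List.slice_to_natCast, PySem.List.slice_from_natCast, ih,
        List.range_succ_eq_map]
    simp only [List.map_cons, List.map_map, List.append_assoc, List.singleton_append]
    congr 2
    · simp
    · apply List.map_congr_left
      intro i _
      simp only [Function.comp]
      rw [List.drop_drop]
      rw [Nat.succ_mul, Nat.add_comm (i * m) m]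

-- A's inner loop over range(num_bands) equals the same chunk list
theorem createA_inner_eq (m : Nat) (s : List Int) :
    (PySem.List.pyRange 0 (m : Int) 1).foldl (fun b i =>
      b ++ [PySem.Set.ofList (PySem.List.slice s (some (i * (m : Int))) (some ((i + 1) * (m : Int))))]) [] =
    (List.range m).map (fun i => PySem.Set.ofList ((s.drop (i * m)).take m)) := by
  rw [PySem.List.foldl_append_singleton_eq_map, PySem.List.pyRange_one]
  simp only [List.nil_append, List.map_map, sub_zero, Int.toNat_natCast]
  apply List.map_congr_left
  intro i _
  simp only [Function.comp, zero_add]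
  have e1 : (i : Int) * (m : Int) = ((i * m : Nat) : Int) := by push_cast; ring
  have e2 : ((i : Int) + 1) * (m : Int) = ((i * m + m : Nat) : Int) := by push_cast; ring
  rw [e1, e2, PySem.List.slice_natCast]
  congr 2
  omega

-- ===== VERDICT (by name: the statement is the Claim_ definition above) =====
theorem create_bands_spec : Claim_equal_create_bands := by
  intro shingles num_bands _
  unfold Spec_create_bands create_bands create_bands_alt
  rw [PySem.List.foldl_append_singleton_eq_map, PySem.List.foldl_append_singleton_eq_map]
  apply List.map_congr_left
  intro s _
  by_cases hn : num_bands ≤ 0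
  · rw [PySem.List.pyRange_one_eq_nil hn, pvBandsOf]
    simp [hn]
  · have hmn : num_bands = ((num_bands.toNat : Nat) : Int) := by omega
    rw [hmn, createA_inner_eq num_bands.toNat s, pvBandsOf_eq_chunks]
    simp
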